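-- pv_equiv track=rewrite | github.com/rambaaral/JBNU_PPP_2024 | hw/hw19/hw19_02.py | weather_year
-- ===== SOURCE A (Python) =====
-- def weather_year(list, idx, aaa):
--     dataset = []
--     for i in range(len(list)):
--         if i != 0:
--             if i in aaa:
--                 tokens = str(list[i][idx]).split("-")
--                 dataset.append(tokens[0])
--     return dataset
-- ===== SOURCE B (Python) =====
-- def weather_year(list, idx, aaa):
--     sel = sorted({i for i in aaa if 1 <= i < len(list)})
--     return [str(list[i][idx]).split("-")[0] for i in sel]
-- ===== Notes on version B (the rewrite author's own statement) =====
-- stated objective: simpler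
-- what changed: Instead of scanning every index of the list and testing membership in aaa, B builds the wanted index set directly from aaa (dedup, keep 1 <= i < len(list), sort ascending) and maps the year-extraction over it.
import Mathlib
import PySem

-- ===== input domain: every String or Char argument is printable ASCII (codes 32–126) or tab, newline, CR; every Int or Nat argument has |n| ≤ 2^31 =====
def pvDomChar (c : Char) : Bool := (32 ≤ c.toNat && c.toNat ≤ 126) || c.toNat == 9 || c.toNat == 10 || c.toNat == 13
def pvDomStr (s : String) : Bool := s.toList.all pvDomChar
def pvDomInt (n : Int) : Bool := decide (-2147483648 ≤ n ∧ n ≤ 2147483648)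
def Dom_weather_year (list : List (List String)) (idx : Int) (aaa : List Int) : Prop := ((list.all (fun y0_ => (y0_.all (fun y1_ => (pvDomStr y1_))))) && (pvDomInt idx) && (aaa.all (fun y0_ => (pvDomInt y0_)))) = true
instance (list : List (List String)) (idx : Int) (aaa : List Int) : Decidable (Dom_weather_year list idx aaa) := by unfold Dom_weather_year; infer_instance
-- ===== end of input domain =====

-- B replaces A's full-range scan-and-test with a direct map over the sorted, deduplicated,
-- range-filtered indices of aaa (objective: simpler).

-- ===== PORT A =====
-- shared primitive step: str(list[i][idx]).split("-")[0] (total via pyGetD; exact under Pre_)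
def wyPick (list : List (List String)) (idx : Int) (i : Int) : String :=
  ((PySem.Str.split? (PySem.List.pyGetD (PySem.List.pyGetD list i []) idx "") "-").getD []).headD ""

def weather_year (list : List (List String)) (idx : Int) (aaa : List Int) : List String :=
  (PySem.List.pyRange 0 (list.length : Int) 1).foldl
    (fun dataset i =>
      if i ≠ 0 then
        if i ∈ aaa then
          dataset ++ [wyPick list idx i]
        else dataset
      else dataset) []

-- ===== PORT B =====
def weather_year_alt (list : List (List String)) (idx : Int) (aaa : List Int) : List String :=
  let sel := PySem.List.sorted
      (PySem.Set.ofList (aaa.filter (fun i => decide (1 ≤ i) && decide (i < (list.length : Int)))))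
      (fun x => x) false
  sel.map (fun i => wyPick list idx i)

-- ===== PRECONDITION & SPEC =====
-- Pre_ excludes exactly the inputs where Python A raises IndexError: a selected row on which idx is out of range.
def Pre_weather_year (list : List (List String)) (idx : Int) (aaa : List Int) : Prop :=
  ∀ i ∈ aaa, 1 ≤ i → i < (list.length : Int) →
    PySem.Raise.InRange (PySem.List.pyGetD list i []).length idx
instance (list : List (List String)) (idx : Int) (aaa : List Int) : Decidable (Pre_weather_year list idx aaa) := by unfold Pre_weather_year; infer_instance

def pvWitness_weather_year : List (List String) × Int × List Int :=
  ([["h"], ["2020-01-02", "x"], ["1999-12"]], 0, [2, 1, 2, 5])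

def Spec_weather_year (list : List (List String)) (idx : Int) (aaa : List Int) (out : List String) : Prop := out = weather_year_alt list idx aaa
instance (list : List (List String)) (idx : Int) (aaa : List Int) (out : List String) : Decidable (Spec_weather_year list idx aaa out) := by unfold Spec_weather_year; infer_instance

-- ===== CLAIM (what is proved, stated in full; the proofs are below) =====
def Claim_equal_weather_year : Prop := ∀ (list : List (List String)) (idx : Int) (aaa : List Int), Dom_weather_year list idx aaa → Pre_weather_year list idx aaa → Spec_weather_year list idx aaa (weather_year list idx aaa)

-- ===== LEMMAS AND PROOFS =====

-- the index lists coincide: sorted(set(filter)) of aaa = the admissible indices in ascending order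
lemma wy_indices (n : Int) (aaa : List Int) :
    PySem.List.sorted
      (PySem.Set.ofList (aaa.filter (fun i => decide (1 ≤ i) && decide (i < n))))
      (fun x => x) false
      = (PySem.List.pyRange 0 n 1).filter (fun i => decide (i ≠ 0) && decide (i ∈ aaa)) := by
  apply PySem.List.sorted_eq_of_perm_of_pairwise_lt
  · rw [List.perm_ext_iff_of_nodup]
    · intro i
      simp [PySem.Set.mem_ofList, PySem.List.mem_pyRange_one, List.mem_filter]
      by_cases hmem : i ∈ aaa <;> simp [hmem] <;> omega
    · exact (PySem.List.nodup_pyRange_one 0 n).filter _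
    · exact PySem.Set.nodup_ofList _
  · exact (PySem.List.pairwise_lt_pyRange_one 0 n).filter _

-- ===== VERDICT (by name: the statement is the Claim_ definition above) =====

theorem weather_year_spec : Claim_equal_weather_year := by
  intro list idx aaa _ _
  unfold Spec_weather_year weather_year weather_year_alt
  have hbody : ∀ (acc : List String) (i : Int),
      (if i ≠ 0 then if i ∈ aaa then acc ++ [wyPick list idx i] else acc else acc)
        = (if (decide (i ≠ 0) && decide (i ∈ aaa)) = true then acc ++ [wyPick list idx i] else acc) := by
    intro acc i; by_cases h1 : i ≠ 0 <;> by_cases h2 : i ∈ aaa <;> simp [h1, h2]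
  calc (PySem.List.pyRange 0 (list.length : Int) 1).foldl
        (fun dataset i =>
          if i ≠ 0 then if i ∈ aaa then dataset ++ [wyPick list idx i] else dataset else dataset) []
      = (PySem.List.pyRange 0 (list.length : Int) 1).foldl
        (fun dataset i =>
          if (decide (i ≠ 0) && decide (i ∈ aaa)) = true then dataset ++ [wyPick list idx i] else dataset) [] := by
        exact PySem.List.foldl_congr_mem _ _ _ _ (fun acc i _ => hbody acc i)
    _ = ((PySem.List.pyRange 0 (list.length : Int) 1).filter
          (fun i => decide (i ≠ 0) && decide (i ∈ aaa))).map (wyPick list idx) := by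
        simpa using PySem.List.foldl_append_if
          (fun i => decide (i ≠ 0) && decide (i ∈ aaa)) (wyPick list idx)
          (l := PySem.List.pyRange 0 (list.length : Int) 1) (acc := [])
    _ = _ := by rw [wy_indices]
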